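-- pv_equiv track=rewrite | github.com/albertvisser/server-stuff | all_local_pages.py | build_urllist
-- ===== SOURCE A (Python) =====
-- def parse_part(urlpart):
--     # TODO  uitwerken:
--     # (?P<option>(nieuw|add)) betekent twee urls maken
--     #   een met de waarde xxx en een met yyy op deze plek
--     # (?P<tekst>\d+) betekent dat op deze plek een nummer
--     # (?P<option>ok) betekent op deze plek deze vaste waarde
--     # (?P<trefw>\w+) betekent op deze plek een woord (spaties(s) niet toegestaan
--     # (?P<trefw>(\w|\b)+) betekent op deze plek een frase (spatie(s) wel toegestaan
--     # (?P<msg>.+) betekent ...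
--     # (?P<sel>(\w|\s)+) s staat voor whitespace characters (meer dan spatie)
--     # dit zijn denk ik de belangrijkste
--     if urlpart.startswith('('):
--         part = urlpart[1:-1] # remove parentheses
--         if part.startswith('?P<'):
--             part = part.split('>', 1)[1] # we don't care about the group name here
--         else:
--             return ['unexpected url part: <{}>'.format(urlpart)]
--         # special cases:
--         if part == '\d+': # digits
--             part = '<number>'
--         elif part == '\w+': # characters
--             part = '<word>'
--         elif part in (r'(\w|\b)+', r'(\b|\w)+', '.+'): # phrase   (?P<trefw>(\w|\b)+)
--             part = '<phrase>'
--         elif part == '(\w|\s)+': # phrase                   (?P<sel>(\w|\s)+)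
--             part = '<message>'
--         elif '|' in part: # alternatives
--             part = part[1:-1] # remove parentheses
--             return part.split('|')
--         else:
--             part = part
--         return [part]
--     elif urlpart.startswith('\\'):
--         return ['unexpected url part: <{}>'.format(urlpart)] # TODO do I need to handle this?
--     else:
--         return [urlpart]
--
-- def build_urllist(project, result):
--     """platslaan, sorteren en domein voorvoegen
--     tevens regexp analyseren en echte urls bouwen
--     """
--     ## data = sorted([x for x in (y for y in result.values())])
--     unsorted = []
--     # platslaan
--     for x in result.values():
--         unsorted.extend([y for y in x])
--     # sorteren en regexp analyseren
--     analyzed = []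
--     for x in sorted(unsorted):
--         parts = x.split('/')                #per urldeel een string
--         ready = []                          # list of lists
--         for part in parts:                  # voor elk urldeel:
--             newparts = parse_part(part)     # zet urldeel om naar 1 of meer strings
--             if not ready:
--                 ready = newparts
--             else:
--                 newready = []
--                 for newpart in newparts:
--                     for item in ready:
--                         newready.append('/'.join((item, newpart)))
--                 ready = newready
--         analyzed.extend(ready)
--     result = analyzed
--     # domein  voorvoegen - alleen / is voldoende
--     ## if project == 'magiokis-django':
--         ## result = ['django.magiokis.nl/{}'.format(x) for x in analyzed]
--     ## else:
--         ## result = ['{}.lemoncurry.nl/{}'.format(project, x) for x in analyzed]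
--     result = ['/{}'.format(x) for x in analyzed]
--     return result
-- ===== SOURCE B (Python) =====
-- def parse_part(urlpart):
--     if urlpart.startswith('('):
--         part = urlpart[1:-1]
--         if part.startswith('?P<'):
--             part = part.split('>', 1)[1]
--         else:
--             return ['unexpected url part: <{}>'.format(urlpart)]
--         if part == '\d+':
--             part = '<number>'
--         elif part == '\w+':
--             part = '<word>'
--         elif part in (r'(\w|\b)+', r'(\b|\w)+', '.+'):
--             part = '<phrase>'
--         elif part == '(\w|\s)+':
--             part = '<message>'
--         elif '|' in part:
--             return part[1:-1].split('|')
--         return [part]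
--     elif urlpart.startswith('\\'):
--         return ['unexpected url part: <{}>'.format(urlpart)]
--     return [urlpart]
--
-- def build_urllist(project, result):
--     """platslaan, sorteren en domein voorvoegen
--     tevens regexp analyseren en echte urls bouwen
--     """
--     flat = sorted(u for urls in result.values() for u in urls)
--     analyzed = []
--     for x in flat:
--         lists = [parse_part(p) for p in x.split('/')]
--         # mixed-radix enumeration: combination number k is decoded digit by
--         # digit, the leftmost segment being the least-significant (fastest) digit
--         total = 1
--         for l in lists:
--             total *= len(l)
--         for k in range(total):
--             segs = []
--             for l in lists:
--                 segs.append(l[k % len(l)])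
--                 k //= len(l)
--             analyzed.append('/'.join(segs))
--     return ['/' + x for x in analyzed]
-- ===== Notes on version B (the rewrite author's own statement) =====
-- stated objective: alternative
-- what changed: A's incremental rebuild of the combination list per '/'-segment is replaced by a mixed-radix enumeration: count the combinations (product of option counts), then decode each index k arithmetically (k % len(l) picks the option, k //= len(l)) into its segment choices and join them, the leftmost segment being the fastest digit so the order matches A.
import Mathlib
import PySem

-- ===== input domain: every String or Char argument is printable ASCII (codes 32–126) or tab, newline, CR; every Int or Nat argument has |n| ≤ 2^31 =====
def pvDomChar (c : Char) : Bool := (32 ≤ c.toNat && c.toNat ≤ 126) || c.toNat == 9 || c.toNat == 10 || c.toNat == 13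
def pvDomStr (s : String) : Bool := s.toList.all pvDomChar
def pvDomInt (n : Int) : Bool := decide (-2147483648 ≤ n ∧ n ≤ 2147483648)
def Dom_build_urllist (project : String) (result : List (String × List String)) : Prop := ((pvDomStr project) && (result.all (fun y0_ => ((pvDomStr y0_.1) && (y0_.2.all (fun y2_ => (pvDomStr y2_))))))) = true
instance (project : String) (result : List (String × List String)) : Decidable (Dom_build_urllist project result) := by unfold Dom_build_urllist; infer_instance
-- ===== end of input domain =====

-- B replaces A's incremental per-segment rebuilding of the combination list by a mixed-radix
-- enumeration: count the combinations, then decode each index arithmetically into its segment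
-- choices (alternative decomposition, same cost).

-- ===== PORT A =====
-- shared helper: s.split(sep) for a NON-EMPTY literal sep ("/" or "|"); split? is `some` there, so getD is never taken
def pySplit (s sep : String) : List String := (PySem.Str.split? s sep).getD []

-- parse_part: identical source in Source A and Source B (B keeps it), so a single shared transliteration
def parse_part (urlpart : String) : List String :=
  if PySem.Str.startswith urlpart "(" then
    let part := PySem.Str.slice urlpart (some 1) (some (-1))
    if PySem.Str.startswith part "?P<" then
      -- part.split('>', 1)[1]; the [1] raises IndexError when '>' is absent — excluded by Pre_
      let part := (PySem.List.pyGet? ((PySem.Str.splitMax? part ">" 1).getD []) 1).getD ""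
      if part == "\\d+" then ["<number>"]
      else if part == "\\w+" then ["<word>"]
      else if part == "(\\w|\\b)+" || part == "(\\b|\\w)+" || part == ".+" then ["<phrase>"]
      else if part == "(\\w|\\s)+" then ["<message>"]
      else if PySem.Str.isIn "|" part then pySplit (PySem.Str.slice part (some 1) (some (-1))) "|"
      else [part]
    else [PySem.Str.join "" ["unexpected url part: <", urlpart, ">"]]
  else if PySem.Str.startswith urlpart "\\" then
    [PySem.Str.join "" ["unexpected url part: <", urlpart, ">"]]
  else [urlpart]

-- A's inner "for part in parts" loop body
def a_step (ready : List String) (part : String) : List String :=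
  let newparts := parse_part part
  if ready.isEmpty then newparts
  else newparts.foldl (fun newready newpart =>
    newready ++ ready.map (fun item => PySem.Str.join "/" [item, newpart])) []

def build_urllist (project : String) (result : List (String × List String)) : List String :=
  -- platslaan
  let unsorted := (PySem.Dict.values (PySem.Dict.ofList result)).foldl
      (fun acc x => acc ++ x.map (fun y => y)) []
  -- sorteren en regexp analyseren
  let analyzed := (PySem.List.sorted unsorted (fun x => x) false).foldl (fun analyzed x =>
      let parts := pySplit x "/"
      let ready := parts.foldl a_step []
      analyzed ++ ready) []
  -- domein voorvoegen
  analyzed.map (fun x => PySem.Str.join "" ["/", x])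

-- ===== PORT B =====
def build_urllist_alt (project : String) (result : List (String × List String)) : List String :=
  let flat := PySem.List.sorted
      ((PySem.Dict.values (PySem.Dict.ofList result)).flatMap (fun urls => urls)) (fun x => x) false
  let analyzed := flat.foldl (fun analyzed x =>
      let lists := (pySplit x "/").map parse_part
      let total := lists.foldl (fun t l => t * (l.length : Int)) 1
      (PySem.List.pyRange 0 total 1).foldl (fun analyzed k =>
        -- inner "for l in lists": segs.append(l[k % len(l)]); k //= len(l)
        -- (parse_part never returns [], so len(l) > 0: the % / // never divide by zero and
        --  the index is in range, so the pyGet? is always `some` and the getD never taken)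
        let segs := (lists.foldl (fun (st : List String × Int) l =>
            (st.1 ++ [(PySem.List.pyGet? l (PySem.Int.mod st.2 (l.length : Int))).getD ""],
             PySem.Int.floordiv st.2 (l.length : Int))) ([], k)).1
        analyzed ++ [PySem.Str.join "/" segs]) analyzed) []
  analyzed.map (fun x => PySem.Str.join "" ["/", x])

-- ===== PRECONDITION & SPEC =====
-- a url part on which parse_part's "part.split('>', 1)[1]" raises IndexError: "(…"-part whose
-- inside starts with "?P<" but contains no ">"
def pvPartBad (part : String) : Bool :=
  PySem.Str.startswith part "(" &&
  PySem.Str.startswith (PySem.Str.slice part (some 1) (some (-1))) "?P<" &&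
  !(PySem.Str.isIn ">" (PySem.Str.slice part (some 1) (some (-1))))

-- Pre_ excludes exactly the inputs on which A (and B alike) raises IndexError: some url among the
-- dict's values has a '/'-segment of shape '(?P<…' with no closing '>'
def Pre_build_urllist (project : String) (result : List (String × List String)) : Prop :=
  ((PySem.Dict.values (PySem.Dict.ofList result)).all (fun urls =>
    urls.all (fun url => (pySplit url "/").all (fun p => !pvPartBad p)))) = true
instance (project : String) (result : List (String × List String)) : Decidable (Pre_build_urllist project result) := by unfold Pre_build_urllist; infer_instance

def pvWitness_build_urllist : String × (List (String × List String)) :=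
  ("p", [("pages", ["index/(?P<id>\\d+)", "about"])])

def Spec_build_urllist (project : String) (result : List (String × List String)) (out : List String) : Prop := out = build_urllist_alt project result
instance (project : String) (result : List (String × List String)) (out : List String) : Decidable (Spec_build_urllist project result out) := by unfold Spec_build_urllist; infer_instance

-- ===== CLAIM (what is proved, stated in full; the proofs are below) =====
def Claim_equal_build_urllist : Prop := ∀ (project : String) (result : List (String × List String)), Dom_build_urllist project result → Pre_build_urllist project result → Spec_build_urllist project result (build_urllist project result)

-- ===== LEMMAS AND PROOFS =====

-- the pure decoding of combination index k into segment choices (leftmost = fastest digit)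
def decodeN : List (List String) → Nat → List String
  | [], _ => []
  | l :: ls, k => l.getD (k % l.length) "" :: decodeN ls (k / l.length)

def prodLen (ls : List (List String)) : Nat := (ls.map List.length).prod

theorem go_ne_nil (sep : List Char) : ∀ (fuel : Nat) (l cur : List Char) (acc : List (List Char)),
    PySem.Chars.splitOn.go sep fuel l cur acc ≠ [] := by
  intro fuel
  induction fuel with
  | zero => intro l cur acc; simp [PySem.Chars.splitOn.go]
  | succ n ih =>
    intro l cur acc
    cases l with
    | nil => simp [PySem.Chars.splitOn.go]
    | cons c rest =>
      rw [PySem.Chars.splitOn.go]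
      split
      · exact ih _ _ _
      · exact ih _ _ _

theorem pySplit_ne_nil (s sep : String) (h : sep.toList ≠ []) : pySplit s sep ≠ [] := by
  have hb := PySem.Str.split?_map s sep
  unfold pySplit
  cases hq : PySem.Str.split? s sep with
  | none =>
    rw [hq] at hb
    simp [PySem.Chars.split?, List.isEmpty_iff, h] at hb
  | some l =>
    rw [hq] at hb
    simp only [Option.map_some, PySem.Chars.split?, List.isEmpty_iff] at hb
    rw [if_neg h] at hb
    rintro rfl
    exact go_ne_nil _ _ _ _ _ (by simpa [PySem.Chars.splitOn] using (Option.some.inj hb).symm)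

theorem parse_part_ne_nil (p : String) : parse_part p ≠ [] := by
  have hbar : ("|" : String).toList ≠ [] := by decide
  unfold parse_part
  split_ifs
  · dsimp only
    split_ifs
    · exact List.cons_ne_nil _ _
    · exact List.cons_ne_nil _ _
    · exact List.cons_ne_nil _ _
    · exact List.cons_ne_nil _ _
    · exact pySplit_ne_nil _ "|" hbar
    · exact List.cons_ne_nil _ _
    · exact List.cons_ne_nil _ _
  · exact List.cons_ne_nil _ _
  · exact List.cons_ne_nil _ _

theorem chars_join_two (sep a b : List Char) (rest : List (List Char)) :
    PySem.Chars.join sep ((a ++ sep ++ b) :: rest) = PySem.Chars.join sep (a :: b :: rest) := by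
  cases rest with
  | nil => simp [PySem.Chars.join_cons_cons, PySem.Chars.join_singleton, List.append_assoc]
  | cons r t => simp [PySem.Chars.join_cons_cons, List.append_assoc]

theorem join_cons_foldl (segs : List String) : ∀ x : String,
    PySem.Str.join "/" (x :: segs) =
      segs.foldl (fun s y => PySem.Str.join "/" [s, y]) x := by
  induction segs with
  | nil =>
    intro x
    simp [PySem.Str.join, PySem.Chars.join_singleton]
  | cons y rest ih =>
    intro x
    rw [List.foldl_cons, ← ih]
    simp only [PySem.Str.join]
    apply congrArg String.ofList
    simp only [List.map_cons, List.map_nil]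
    rw [show PySem.Chars.join "/".toList [x.toList, y.toList] = x.toList ++ "/".toList ++ y.toList by
      simp [PySem.Chars.join_cons_cons, PySem.Chars.join_singleton]]
    simp only [String.toList_ofList]
    exact (chars_join_two "/".toList x.toList y.toList (rest.map String.toList)).symm

theorem a_step_of_ne_nil (ready : List String) (p : String) (h : ready ≠ []) :
    a_step ready p = (parse_part p).flatMap
      (fun np => ready.map (fun item => PySem.Str.join "/" [item, np])) := by
  unfold a_step
  rw [if_neg (by simpa [List.isEmpty_iff] using h)]
  rw [PySem.List.foldl_append_eq_flatMap]
  simp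

-- A's cartesian step, re-indexed: the flatMap over the options and the existing list is the
-- enumeration of all indices k < |ready|·|opts|, k % |ready| picking the item, k / |ready| the option
theorem flatMap_eq_range_map {α β γ : Type} (l1 : List β) (l2 : List α) (g : α → β → γ)
    (d1 : α) (d2 : β) (h2 : 0 < l2.length) :
    l1.flatMap (fun b => l2.map (fun a => g a b)) =
      (List.range (l2.length * l1.length)).map
        (fun k => g (l2.getD (k % l2.length) d1) (l1.getD (k / l2.length) d2)) := by
  induction l1 with
  | nil => simp
  | cons b t ih =>
    rw [List.flatMap_cons, ih]
    rw [show l2.length * (b :: t).length = l2.length + l2.length * t.length by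
      simp [Nat.mul_succ, Nat.add_comm]]
    rw [List.range_add, List.map_append, List.map_map]
    congr 1
    · apply List.ext_getElem (by simp)
      intro i h1 _
      simp only [List.getElem_map, List.getElem_range]
      have hi : i < l2.length := by simpa using h1
      rw [Nat.mod_eq_of_lt hi, Nat.div_eq_of_lt hi, List.getD_eq_getElem _ _ hi]
      simp
    · apply List.map_congr_left
      intro j _
      simp only [Function.comp_def]
      rw [Nat.add_mod_left, show l2.length + j = j + l2.length from Nat.add_comm _ _,
        Nat.add_div_right _ h2]
      simp

-- A's fold over the remaining segments, as a single enumeration of combination indices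
theorem foldA_range (ps : List String) : ∀ ready : List String, ready ≠ [] →
    ps.foldl a_step ready =
      (List.range (ready.length * prodLen (ps.map parse_part))).map
        (fun k => (decodeN (ps.map parse_part) (k / ready.length)).foldl
          (fun s y => PySem.Str.join "/" [s, y]) (ready.getD (k % ready.length) "")) := by
  induction ps with
  | nil =>
    intro ready h
    simp only [List.foldl_nil, List.map_nil, prodLen, List.prod_nil, Nat.mul_one]
    apply List.ext_getElem (by simp)
    intro i h1 h2
    have hi : i < ready.length := h1
    simp only [List.getElem_map, List.getElem_range, decodeN, List.foldl_nil]
    rw [Nat.mod_eq_of_lt hi, List.getD_eq_getElem _ _ hi]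
  | cons p ps ih =>
    intro ready h
    have hm : 0 < ready.length := List.length_pos_iff.mpr h
    have hn : 0 < (parse_part p).length := List.length_pos_iff.mpr (parse_part_ne_nil p)
    have hmn : 0 < ready.length * (parse_part p).length := Nat.mul_pos hm hn
    rw [List.foldl_cons, a_step_of_ne_nil ready p h,
      flatMap_eq_range_map (parse_part p) ready _ "" "" hm]
    have hr' : (List.range (ready.length * (parse_part p).length)).map
        (fun k => PySem.Str.join "/" [ready.getD (k % ready.length) "",
          (parse_part p).getD (k / ready.length) ""]) ≠ [] := by
      simp only [ne_eq, List.map_eq_nil_iff, List.range_eq_nil]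
      omega
    rw [ih _ hr']
    simp only [List.length_map, List.length_range, List.map_cons, prodLen, List.prod_cons]
    apply List.ext_getElem (by simp [Nat.mul_assoc])
    intro i h1 h2
    simp only [List.getElem_map, List.getElem_range]
    rw [PySem.List.getD_map_range _ _ _ _ (Nat.mod_lt _ hmn)]
    rw [show decodeN (parse_part p :: ps.map parse_part) (i / ready.length) =
      (parse_part p).getD (i / ready.length % (parse_part p).length) "" ::
        decodeN (ps.map parse_part) (i / ready.length / (parse_part p).length) from rfl,
      List.foldl_cons]
    rw [Nat.div_div_eq_div_mul, Nat.mod_mod_of_dvd _ ⟨(parse_part p).length, rfl⟩,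
      Nat.mod_mul_right_div_self]

-- A's whole per-url loop equals B's mixed-radix enumeration of the same url
theorem per_url_eq (x : String) :
    (pySplit x "/").foldl a_step [] =
      (List.range (prodLen ((pySplit x "/").map parse_part))).map
        (fun k => PySem.Str.join "/" (decodeN ((pySplit x "/").map parse_part) k)) := by
  cases hps : pySplit x "/" with
  | nil => exact absurd hps (pySplit_ne_nil x "/" (by decide))
  | cons p rest =>
    rw [List.foldl_cons]
    rw [show a_step [] p = parse_part p by simp [a_step]]
    rw [foldA_range rest (parse_part p) (parse_part_ne_nil p)]
    simp only [List.map_cons, prodLen, List.prod_cons]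
    apply List.map_congr_left
    intro k _
    rw [show decodeN ((parse_part p) :: rest.map parse_part) k =
      (parse_part p).getD (k % (parse_part p).length) "" ::
        decodeN (rest.map parse_part) (k / (parse_part p).length) from rfl]
    rw [join_cons_foldl]

-- B's inner "for l in lists" loop computes decodeN (parse_part never returns [])
theorem b_inner_eq (lists : List (List String)) : ∀ (k : Nat) (acc : List String),
    (∀ l ∈ lists, l ≠ []) →
    (lists.foldl (fun (st : List String × Int) l =>
        (st.1 ++ [(PySem.List.pyGet? l (PySem.Int.mod st.2 (l.length : Int))).getD ""],
         PySem.Int.floordiv st.2 (l.length : Int))) (acc, (k : Int))).1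
      = acc ++ decodeN lists k := by
  induction lists with
  | nil => intro k acc _; simp [decodeN]
  | cons l ls ih =>
    intro k acc hne
    have hl : l ≠ [] := hne l (List.mem_cons_self)
    rw [List.foldl_cons]
    simp only [PySem.Int.mod_natCast, PySem.Int.floordiv_natCast, PySem.List.pyGet?_natCast]
    rw [ih _ _ (fun l' hl' => hne l' (List.mem_cons_of_mem _ hl'))]
    simp [decodeN, List.getD_eq_getElem?_getD]

-- B's per-url total is the product of the option counts
theorem b_total_eq (lists : List (List String)) : ∀ c : Int,
    lists.foldl (fun t l => t * (l.length : Int)) c = c * (prodLen lists : Int) := by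
  induction lists with
  | nil => intro c; simp [prodLen]
  | cons l ls ih =>
    intro c
    rw [List.foldl_cons, ih]
    simp only [prodLen, List.map_cons, List.prod_cons]
    push_cast
    ring

-- B's per-url range loop, reduced to the same enumeration map
theorem b_per_url (x : String) (analyzed : List String) :
    (PySem.List.pyRange 0 ((((pySplit x "/").map parse_part).foldl
        (fun t l => t * (l.length : Int)) 1)) 1).foldl (fun analyzed k =>
      let segs := (((pySplit x "/").map parse_part).foldl (fun (st : List String × Int) l =>
          (st.1 ++ [(PySem.List.pyGet? l (PySem.Int.mod st.2 (l.length : Int))).getD ""],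
           PySem.Int.floordiv st.2 (l.length : Int))) ([], k)).1
      analyzed ++ [PySem.Str.join "/" segs]) analyzed
    = analyzed ++ (List.range (prodLen ((pySplit x "/").map parse_part))).map
        (fun k => PySem.Str.join "/" (decodeN ((pySplit x "/").map parse_part) k)) := by
  rw [b_total_eq, one_mul, PySem.List.pyRange_zero_nat, List.foldl_map]
  have hk : ∀ k : Nat,
      ((((pySplit x "/").map parse_part).foldl (fun (st : List String × Int) l =>
          (st.1 ++ [(PySem.List.pyGet? l (PySem.Int.mod st.2 (l.length : Int))).getD ""],
           PySem.Int.floordiv st.2 (l.length : Int))) ([], (k : Int))).1)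
        = decodeN ((pySplit x "/").map parse_part) k := by
    intro k
    rw [b_inner_eq _ k [] (by
      intro l hl
      rcases List.mem_map.mp hl with ⟨p, _, rfl⟩
      exact parse_part_ne_nil p)]
    simp
  calc (List.range (prodLen ((pySplit x "/").map parse_part))).foldl
        (fun analyzed (k : Nat) =>
          analyzed ++ [PySem.Str.join "/" ((((pySplit x "/").map parse_part).foldl
            (fun (st : List String × Int) l =>
              (st.1 ++ [(PySem.List.pyGet? l (PySem.Int.mod st.2 (l.length : Int))).getD ""],
               PySem.Int.floordiv st.2 (l.length : Int))) ([], (k : Int))).1)]) analyzed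
      = (List.range (prodLen ((pySplit x "/").map parse_part))).foldl
        (fun analyzed (k : Nat) =>
          analyzed ++ [PySem.Str.join "/" (decodeN ((pySplit x "/").map parse_part) k)]) analyzed := by
        apply PySem.List.foldl_congr_mem
        intro acc k _
        rw [hk k]
    _ = _ := PySem.List.foldl_append_singleton_eq_map _ _ _

-- ===== VERDICT (by name: the statement is the Claim_ definition above) =====
theorem build_urllist_spec : Claim_equal_build_urllist := by
  intro project result _ _
  unfold Spec_build_urllist build_urllist build_urllist_alt
  dsimp only
  have hflat : (PySem.Dict.values (PySem.Dict.ofList result)).foldl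
      (fun acc x => acc ++ x.map (fun y => y)) [] =
      (PySem.Dict.values (PySem.Dict.ofList result)).flatMap (fun urls => urls) := by
    rw [PySem.List.foldl_append_eq_flatMap]
    simp
  rw [hflat]
  congr 1
  apply PySem.List.foldl_congr_mem
  intro analyzed x _
  rw [b_per_url x analyzed, ← per_url_eq]
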